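-- pv_equiv track=rewrite | github.com/ndthien407/TicTacToe | TIC-TAC-TOE-compile.py | game_continue
-- ===== SOURCE A (Python) =====
-- def row(board, start, mark):
--     return board[start] == board[start + 1] and board[start +1] == board[start +2] and board[start +2] == mark
--
-- def column(board, start, mark):
--     return board[start] == board[start + 3] and board[start +3] == board[start +6] and board[start +6] == mark
--
-- def diagonal_1(board, start, mark):
--     return board[start] == board[start + 4] and board[start +4] == board[start +8] and board[start +8] == mark
--
-- def diagonal_2(board, start, mark):
--     return board[start] == board[start + 2] and board[start +2] == board[start +4] and board[start +4] == mark
--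
-- def is_draw(board):
--     for i in range(0, len(board)):
--         if board[i] != "O" and board[i] != "X":
--             return False
--     return True
--
-- def game_continue(board):
--     for mark in ["O","X"]:
--         if row(board, 0,mark) or row(board, 3,mark) or row(board, 6,mark):
--             return False
--         if column(board, 0, mark) or column(board, 1, mark) or column(board, 2, mark):
--             return False
--         if diagonal_1 (board, 0, mark):
--
--             return False
--         if diagonal_2 (board, 2, mark):
--             return False
--
--
--     return not is_draw(board) # return True
-- ===== SOURCE B (Python) =====
-- MAGIC = [8, 1, 6, 3, 5, 7, 4, 9, 2]
--
-- def game_continue(board):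
--     for mark in ("O", "X"):
--         vals = [MAGIC[i] for i in range(9) if board[i] == mark]
--         n = len(vals)
--         for i in range(n):
--             for j in range(i + 1, n):
--                 for k in range(j + 1, n):
--                     if vals[i] + vals[j] + vals[k] == 15:
--                         return False
--     return any(c != "O" and c != "X" for c in board)
-- ===== Notes on version B (the rewrite author's own statement) =====
-- stated objective: alternative
-- what changed: Replaces A's hard-coded row/column/diagonal line checks by the magic-square method: cells are mapped to the 3x3 magic square [8,1,6,3,5,7,4,9,2] and a mark wins iff three of its occupied magic numbers sum to 15, tested by a triple loop over the collected numbers; the line geometry disappears entirely.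
-- outside the precondition, e.g. on game_continue(['O', 'O', 'O']): A returns False, B raises IndexError
import Mathlib
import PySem

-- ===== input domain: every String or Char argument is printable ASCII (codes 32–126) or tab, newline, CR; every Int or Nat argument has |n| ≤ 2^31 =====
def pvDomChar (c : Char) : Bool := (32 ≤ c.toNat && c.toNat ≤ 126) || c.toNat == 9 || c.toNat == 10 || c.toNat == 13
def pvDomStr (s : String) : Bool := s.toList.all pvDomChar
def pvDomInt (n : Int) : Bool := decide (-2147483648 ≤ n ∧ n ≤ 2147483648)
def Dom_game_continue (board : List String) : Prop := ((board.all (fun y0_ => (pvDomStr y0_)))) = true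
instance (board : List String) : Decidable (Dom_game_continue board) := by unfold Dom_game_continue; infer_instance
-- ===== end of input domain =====

-- B replaces A's hard-coded row/column/diagonal checks by the magic-square method:
-- cells map to [8,1,6,3,5,7,4,9,2] and a mark wins iff three of its occupied magic
-- numbers sum to 15 (objective: alternative).

-- ===== PORT A =====
def rowA (board : List String) (start : Int) (mark : String) : Bool :=
  (PySem.List.pyGet? board start == PySem.List.pyGet? board (start + 1)) &&
  (PySem.List.pyGet? board (start + 1) == PySem.List.pyGet? board (start + 2)) &&
  (PySem.List.pyGet? board (start + 2) == some mark)

def columnA (board : List String) (start : Int) (mark : String) : Bool :=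
  (PySem.List.pyGet? board start == PySem.List.pyGet? board (start + 3)) &&
  (PySem.List.pyGet? board (start + 3) == PySem.List.pyGet? board (start + 6)) &&
  (PySem.List.pyGet? board (start + 6) == some mark)

def diag1A (board : List String) (start : Int) (mark : String) : Bool :=
  (PySem.List.pyGet? board start == PySem.List.pyGet? board (start + 4)) &&
  (PySem.List.pyGet? board (start + 4) == PySem.List.pyGet? board (start + 8)) &&
  (PySem.List.pyGet? board (start + 8) == some mark)

def diag2A (board : List String) (start : Int) (mark : String) : Bool :=
  (PySem.List.pyGet? board start == PySem.List.pyGet? board (start + 2)) &&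
  (PySem.List.pyGet? board (start + 2) == PySem.List.pyGet? board (start + 4)) &&
  (PySem.List.pyGet? board (start + 4) == some mark)

-- for i in range(0, len(board)): if board[i] != "O" and board[i] != "X": return False / return True
def isDrawA (board : List String) : Bool :=
  (PySem.List.pyRange 0 (board.length : Int) 1).all
    (fun i => !((PySem.List.pyGet? board i != some "O") && (PySem.List.pyGet? board i != some "X")))

def gcLoopA (board : List String) : List String → Bool
  | [] => !(isDrawA board)
  | mark :: rest =>
    if rowA board 0 mark || rowA board 3 mark || rowA board 6 mark then false
    else if columnA board 0 mark || columnA board 1 mark || columnA board 2 mark then false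
    else if diag1A board 0 mark then false
    else if diag2A board 2 mark then false
    else gcLoopA board rest

def game_continue (board : List String) : Bool := gcLoopA board ["O", "X"]

-- ===== PORT B =====
def pvMagic : List Int := [8, 1, 6, 3, 5, 7, 4, 9, 2]

-- vals = [MAGIC[i] for i in range(9) if board[i] == mark]
-- (pyGet? pvMagic i is always some for i in range(9), so filterMap is exact here)
def pvVals (board : List String) (mark : String) : List Int :=
  (PySem.List.pyRange 0 9 1).filterMap (fun i =>
    if PySem.List.pyGet? board i == some mark then PySem.List.pyGet? pvMagic i else none)

-- for i in range(n): for j in range(i+1, n): for k in range(j+1, n): if vals[i]+vals[j]+vals[k]==15: return False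
-- (pyGetD with default 0 is exact: the loop indices are always in range)
def pvWin15 (vals : List Int) : Bool :=
  (PySem.List.pyRange 0 (vals.length : Int) 1).any (fun i =>
    (PySem.List.pyRange (i + 1) (vals.length : Int) 1).any (fun j =>
      (PySem.List.pyRange (j + 1) (vals.length : Int) 1).any (fun k =>
        PySem.List.pyGetD vals i 0 + PySem.List.pyGetD vals j 0 + PySem.List.pyGetD vals k 0 == 15)))

def gcLoopB (board : List String) : List String → Bool
  | [] => board.any (fun cell => cell != "O" && cell != "X")
  | mark :: rest =>
    if pvWin15 (pvVals board mark) then false else gcLoopB board rest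

def game_continue_alt (board : List String) : Bool := gcLoopB board ["O", "X"]

-- ===== PRECONDITION & SPEC =====
-- Pre_ excludes boards with fewer than 9 cells: on those Python A raises IndexError,
-- except when an already-complete earlier line makes A return False before the bad index
-- (those few returning boards are excluded too; Python B raises IndexError on all of them).
def Pre_game_continue (board : List String) : Prop := 9 ≤ board.length
instance (board : List String) : Decidable (Pre_game_continue board) := by
  unfold Pre_game_continue; infer_instance

def pvWitness_game_continue : List String := ["O", "X", "O", "O", "X", "X", "X", "O", "O"]

def Spec_game_continue (board : List String) (out : Bool) : Prop := out = game_continue_alt board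
instance (board : List String) (out : Bool) : Decidable (Spec_game_continue board out) := by
  unfold Spec_game_continue; infer_instance

-- ===== CLAIM (what is proved, stated in full; the proofs are below) =====
def Claim_equal_game_continue : Prop := ∀ (board : List String), Dom_game_continue board → Pre_game_continue board → Spec_game_continue board (game_continue board)

-- ===== LEMMAS AND PROOFS =====

-- with x == y and y == z, the chain 'x==y && y==z && z==m' says all three equal m
theorem pvTriple (x y z m : Option String) :
    ((x == y) && (y == z) && (z == m)) = ((x == m) && ((y == m) && (z == m))) := by
  by_cases hx : x = y
  · by_cases hy : y = z
    · subst hx; subst hy; simp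
    · have h : (y == z) = false := beq_eq_false_iff_ne.mpr hy
      by_cases hz : z = m
      · subst hz
        by_cases hym : y = z
        · exact absurd hym hy
        · have h2 : (y == z) = false := beq_eq_false_iff_ne.mpr hym
          simp [h2]
      · have h3 : (z == m) = false := beq_eq_false_iff_ne.mpr hz
        simp [h, h3]
  · have h : (x == y) = false := beq_eq_false_iff_ne.mpr hx
    by_cases hxm : x = m
    · subst hxm
      by_cases hym : y = x
      · exact absurd hym.symm hx
      · have h2 : (y == x) = false := beq_eq_false_iff_ne.mpr hym
        by_cases hzm : z = x
        · subst hzm; simp [h, h2]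
        · have h3 : (z == x) = false := beq_eq_false_iff_ne.mpr hzm
          simp [h, h3]
    · have h2 : (x == m) = false := beq_eq_false_iff_ne.mpr hxm
      simp [h, h2]

-- B's per-cell any-pass is the negation of A's index-loop draw test, for every board
theorem pvDraw (board : List String) :
    board.any (fun cell => cell != "O" && cell != "X") = !(isDrawA board) := by
  unfold isDrawA
  rw [PySem.List.pyRange_zero_natCast]
  apply Bool.eq_iff_iff.mpr
  simp [List.any_eq_true, List.mem_iff_getElem]
  constructor
  · rintro ⟨i, hi, h1, h2⟩
    exact ⟨i, hi, by simp [List.getElem?_eq_getElem hi, h1], by simp [List.getElem?_eq_getElem hi, h2]⟩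
  · rintro ⟨i, hi, h1, h2⟩
    rw [List.getElem?_eq_getElem hi] at h1 h2
    exact ⟨i, hi, by simpa using h1, by simpa using h2⟩

theorem pvIteFalse (c x : Bool) : (if c = true then false else x) = (!c && x) := by
  cases c <;> simp

-- the magic-square fact, as a function of the nine occupancy booleans:
-- three occupied magic numbers sum to 15 exactly on the eight tic-tac-toe lines
set_option maxHeartbeats 2000000 in
theorem pvMagicKey (c0 c1 c2 c3 c4 c5 c6 c7 c8 : Bool) :
    pvWin15 ((if c0 then [(8:Int)] else []) ++ ((if c1 then [(1:Int)] else []) ++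
      ((if c2 then [(6:Int)] else []) ++ ((if c3 then [(3:Int)] else []) ++
      ((if c4 then [(5:Int)] else []) ++ ((if c5 then [(7:Int)] else []) ++
      ((if c6 then [(4:Int)] else []) ++ ((if c7 then [(9:Int)] else []) ++
      ((if c8 then [(2:Int)] else []) ++ []))))))))) =
    ((c0 && (c1 && c2)) || (c3 && (c4 && c5)) || (c6 && (c7 && c8)) ||
     (c0 && (c3 && c6)) || (c1 && (c4 && c7)) || (c2 && (c5 && c8)) ||
     (c0 && (c4 && c8)) || (c2 && (c4 && c6))) := by
  revert c0 c1 c2 c3 c4 c5 c6 c7 c8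
  decide

-- B's vals list, rewritten to the appended-singletons shape of pvMagicKey
theorem pvFMcons {a : Int} {l : List Int} (f : Int → Option Int) :
    List.filterMap f (a :: l) = (f a).toList ++ List.filterMap f l := by
  cases h : f a <;> simp [h]

theorem pvIfOpt (c : Bool) (o : Option Int) :
    (if c = true then o else none).toList = if c = true then o.toList else [] := by
  split <;> rfl

theorem pvValsEq (board : List String) (mark : String) :
    pvVals board mark =
    (if PySem.List.pyGet? board 0 == some mark then [(8:Int)] else []) ++
    ((if PySem.List.pyGet? board 1 == some mark then [(1:Int)] else []) ++
    ((if PySem.List.pyGet? board 2 == some mark then [(6:Int)] else []) ++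
    ((if PySem.List.pyGet? board 3 == some mark then [(3:Int)] else []) ++
    ((if PySem.List.pyGet? board 4 == some mark then [(5:Int)] else []) ++
    ((if PySem.List.pyGet? board 5 == some mark then [(7:Int)] else []) ++
    ((if PySem.List.pyGet? board 6 == some mark then [(4:Int)] else []) ++
    ((if PySem.List.pyGet? board 7 == some mark then [(9:Int)] else []) ++
    ((if PySem.List.pyGet? board 8 == some mark then [(2:Int)] else []) ++ ([]:List Int))))))))) := by
  unfold pvVals
  have hr : PySem.List.pyRange 0 9 1 = [0, 1, 2, 3, 4, 5, 6, 7, 8] := by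
    simp [PySem.List.pyRange_one, List.range_succ]
  rw [hr]
  simp only [pvFMcons, List.filterMap_nil, pvIfOpt]
  norm_num [pvMagic, PySem.List.pyGet?, PySem.List.pyIdx?, Option.toList]
  rfl

theorem pvMain (board : List String) :
    game_continue board = game_continue_alt board := by
  unfold game_continue game_continue_alt
  simp only [gcLoopA, gcLoopB]
  rw [pvDraw board]
  rw [pvValsEq board "O", pvValsEq board "X", pvMagicKey, pvMagicKey]
  simp only [rowA, columnA, diag1A, diag2A, Int.reduceAdd]
  simp only [pvTriple]
  simp only [pvIteFalse, Bool.not_or, Bool.and_assoc]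

-- ===== VERDICT (by name: the statement is the Claim_ definition above) =====
theorem game_continue_spec : Claim_equal_game_continue := by
  intro board _ _
  exact pvMain board
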